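-- pv_equiv track=rewrite | github.com/kayoung-dev/problem-solving | generator/level01/g052.py | solve_internal
-- ===== SOURCE A (Python) =====
-- def solve_internal(l, w, n, weights):
--     from collections import deque
--     pkgs = deque(weights)
--     walk = deque([0] * l)
--     cur_w = 0
--     time = 0
--     while walk:
--         time += 1
--         cur_w -= walk.popleft()
--         if pkgs:
--             if cur_w + pkgs[0] <= w:
--                 p = pkgs.popleft()
--                 walk.append(p)
--                 cur_w += p
--             else:
--                 walk.append(0)
--     return str(time)
-- ===== SOURCE B (Python) =====
-- def solve_internal(l, w, n, weights):
--     from collections import deque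
--     if l <= 0:
--         return "0"  # no belt to put packages on
--     belt = deque()  # (exit_time, weight) of loaded packages, exit times increasing
--     cur = 0
--     t = 0
--     for wt in weights:
--         t += 1
--         while belt and belt[0][0] <= t:
--             cur -= belt.popleft()[1]
--         while cur + wt > w:
--             e, x = belt.popleft()
--             t = e
--             cur -= x
--         belt.append((t + l, wt))
--         cur += wt
--     return str(t + l if weights else l)
-- ===== Notes on version B (the rewrite author's own statement) =====
-- stated objective: alternative
-- what changed: A simulates the conveyor belt one second per loop iteration over a dense zero-filled deque of length l; B keeps only the loaded packages as an event queue of (exit_time, weight) pairs and jumps the clock straight to the next package exit, so its loop count is driven by the number of packages rather than by the simulated seconds.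
-- outside the precondition, e.g. on solve_internal(2, 5, 2, [-3, 7]): A returns '4', B returns '4'
import Mathlib
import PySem

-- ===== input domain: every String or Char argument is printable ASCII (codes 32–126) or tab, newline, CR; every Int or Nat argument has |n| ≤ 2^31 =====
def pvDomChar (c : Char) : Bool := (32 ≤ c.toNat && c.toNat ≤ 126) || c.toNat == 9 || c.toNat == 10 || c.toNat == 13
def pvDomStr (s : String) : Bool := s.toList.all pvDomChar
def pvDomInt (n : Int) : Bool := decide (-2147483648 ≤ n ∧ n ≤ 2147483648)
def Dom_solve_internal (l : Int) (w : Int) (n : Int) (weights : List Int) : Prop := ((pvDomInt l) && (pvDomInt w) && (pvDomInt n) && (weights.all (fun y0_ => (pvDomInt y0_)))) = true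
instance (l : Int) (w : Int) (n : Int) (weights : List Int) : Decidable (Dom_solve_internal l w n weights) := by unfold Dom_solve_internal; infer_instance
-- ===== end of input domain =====

-- B replaces A's unit-time belt simulation (one loop iteration per simulated second) by an
-- event-driven queue of (exit_time, weight) pairs that jumps the clock straight to the next
-- package exit; equivalence is proved on Pre_ (all weights ≤ w whenever l ≥ 1).

-- ===== PORT A =====
-- A's while-loop, made total with fuel; under Pre_ the run takes at most
-- (|weights|+1)*(l+1) steps, so the fuel below is never exhausted (proved in the lemmas).
def simLoop (wcap : Int) : Nat → List Int → List Int → Int → Int → Int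
  | 0, _, _, _, time => time
  | _ + 1, _, [], _, time => time
  | fuel + 1, pkgs, a :: rest, cur_w, time =>
    match pkgs with
    | [] => simLoop wcap fuel [] rest (cur_w - a) (time + 1)
    | p :: ps =>
      if cur_w - a + p ≤ wcap then
        simLoop wcap fuel ps (rest ++ [p]) (cur_w - a + p) (time + 1)
      else
        simLoop wcap fuel (p :: ps) (rest ++ [0]) (cur_w - a) (time + 1)

def solve_internal (l : Int) (w : Int) (n : Int) (weights : List Int) : String :=
  PySem.Int.toStr
    (simLoop w ((weights.length + 1) * (l.toNat + 1) + 1) weights (List.replicate l.toNat 0) 0 0)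

-- ===== PORT B =====
-- `while belt and belt[0][0] <= t: cur -= belt.popleft()[1]`
def expireLoop (t : Int) : List (Int × Int) → Int → List (Int × Int) × Int
  | [], cur => ([], cur)
  | (e, x) :: rest, cur =>
    if e ≤ t then expireLoop t rest (cur - x) else ((e, x) :: rest, cur)

-- `while cur + wt > w: e, x = belt.popleft(); t = e; cur -= x`
-- (on an empty belt with cur + wt > w the Python raises IndexError; that state is
--  unreachable under Pre_, so the [] branch below is a dead default)
def jumpLoop (wcap wt : Int) : List (Int × Int) → Int → Int → List (Int × Int) × Int × Int
  | [], t, cur => ([], t, cur)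
  | (e, x) :: rest, t, cur =>
    if cur + wt > wcap then jumpLoop wcap wt rest e (cur - x) else ((e, x) :: rest, t, cur)

-- body of Source B's `for wt in weights` loop; state = (belt, t, cur)
def procPkg (l wcap : Int) (st : List (Int × Int) × Int × Int) (wt : Int) :
    List (Int × Int) × Int × Int :=
  let t := st.2.1 + 1
  let ec := expireLoop t st.1 st.2.2
  let jr := jumpLoop wcap wt ec.1 t ec.2
  (jr.1 ++ [(jr.2.1 + l, wt)], jr.2.1, jr.2.2 + wt)

def solve_internal_alt (l : Int) (w : Int) (n : Int) (weights : List Int) : String :=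
  if l ≤ 0 then "0"
  else
    let st := weights.foldl (procPkg l w) ([], 0, 0)
    if weights.isEmpty then PySem.Int.toStr l else PySem.Int.toStr (st.2.1 + l)

-- ===== PRECONDITION & SPEC =====
-- Pre_ excludes weight lists containing an item heavier than the capacity w (when l ≥ 1):
-- there A's while-loop almost always never terminates (only negative weights already on the
-- belt can let such an item through).
def Pre_solve_internal (l : Int) (w : Int) (n : Int) (weights : List Int) : Prop :=
  1 ≤ l → ∀ x ∈ weights, x ≤ w
instance (l : Int) (w : Int) (n : Int) (weights : List Int) :
    Decidable (Pre_solve_internal l w n weights) := by unfold Pre_solve_internal; infer_instance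

def pvWitness_solve_internal : Int × Int × Int × List Int := (3, 10, 2, [4, 7])

def Spec_solve_internal (l : Int) (w : Int) (n : Int) (weights : List Int) (out : String) : Prop :=
  out = solve_internal_alt l w n weights
instance (l : Int) (w : Int) (n : Int) (weights : List Int) (out : String) :
    Decidable (Spec_solve_internal l w n weights out) := by unfold Spec_solve_internal; infer_instance

-- ===== CLAIM (what is proved, stated in full; the proofs are below) =====
def Claim_equal_solve_internal : Prop := ∀ (l : Int) (w : Int) (n : Int) (weights : List Int), Dom_solve_internal l w n weights → Pre_solve_internal l w n weights → Spec_solve_internal l w n weights (solve_internal l w n weights)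

-- ===== LEMMAS AND PROOFS =====

-- weight sitting on the belt with exit time t (0 if none)
def lookE : List (Int × Int) → Int → Int
  | [], _ => 0
  | (e, x) :: r, t => if e = t then x else lookE r t

-- A's dense belt as a function of B's sparse one: slot k exits at time+k+1
def render (l time : Int) (belt : List (Int × Int)) : List Int :=
  (List.range l.toNat).map (fun k : Nat => lookE belt (time + (k : Int) + 1))

-- the tail of `render l time belt`
def tailr (l time : Int) (belt : List (Int × Int)) : List Int :=
  (List.range (l.toNat - 1)).map (fun k : Nat => lookE belt (time + (k : Int) + 2))

theorem lookE_eq_zero (b : List (Int × Int)) (t : Int) (h : ∀ q ∈ b, q.1 ≠ t) :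
    lookE b t = 0 := by
  induction b with
  | nil => rfl
  | cons q r ih =>
    obtain ⟨e, x⟩ := q
    simp only [lookE]
    rw [if_neg (h (e, x) (by simp)), ih (fun q hq => h q (by simp [hq]))]

theorem lookE_append_right (b c : List (Int × Int)) (t : Int) (h : ∀ q ∈ b, q.1 ≠ t) :
    lookE (b ++ c) t = lookE c t := by
  induction b with
  | nil => rfl
  | cons q r ih =>
    obtain ⟨e, x⟩ := q
    simp only [List.cons_append, lookE]
    rw [if_neg (h (e, x) (by simp)), ih (fun q hq => h q (by simp [hq]))]

theorem lookE_append_left (b c : List (Int × Int)) (t : Int) (h : ∀ q ∈ c, q.1 ≠ t) :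
    lookE (b ++ c) t = lookE b t := by
  induction b with
  | nil => simpa using lookE_eq_zero c t h
  | cons q r ih =>
    obtain ⟨e, x⟩ := q
    simp only [List.cons_append, lookE, ih]

theorem render_length (l time : Int) (belt : List (Int × Int)) :
    (render l time belt).length = l.toNat := by
  simp [render]

theorem render_nil_eq (l time : Int) : render l time [] = List.replicate l.toNat 0 := by
  simp [render, lookE, List.map_const']

theorem render_cons (l time : Int) (belt : List (Int × Int)) (hl : 1 ≤ l) :
    render l time belt = lookE belt (time + 1) :: tailr l time belt := by
  have hm : l.toNat = (l.toNat - 1) + 1 := by omega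
  apply List.ext_getElem
  · simp [render, tailr]; omega
  · intro i h1 h2
    simp only [render, tailr, List.getElem_map, List.getElem_range]
    rcases i with _ | j
    · simp
    · simp only [List.getElem_cons_succ, List.getElem_map, List.getElem_range]
      push_cast
      ring_nf

theorem render_of_tail (l time : Int) (b b₂ : List (Int × Int)) (z : Int) (hl : 1 ≤ l)
    (hmid : ∀ s : Int, time + 1 < s → s < time + 1 + l → lookE b s = lookE b₂ s)
    (hlast : lookE b₂ (time + 1 + l) = z) :
    tailr l time b ++ [z] = render l (time + 1) b₂ := by
  have hm : l.toNat = (l.toNat - 1) + 1 := by omega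
  have hlen : (tailr l time b).length = l.toNat - 1 := by simp [tailr]
  apply List.ext_getElem
  · simp [render, tailr]; omega
  · intro i h1 h2
    simp only [render, List.getElem_map, List.getElem_range]
    by_cases hi : i < l.toNat - 1
    · rw [List.getElem_append_left (by omega)]
      simp only [tailr, List.getElem_map, List.getElem_range]
      rw [hmid (time + (i : Int) + 2) (by omega) (by omega)]
      congr 1
      omega
    · have hieq : i = l.toNat - 1 := by
        simp only [List.length_append, hlen, List.length_cons, List.length_nil] at h1
        omega
      rw [List.getElem_append_right (by omega)]
      simp only [hlen, hieq, Nat.sub_self, List.getElem_cons_zero]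
      rw [show time + 1 + ((l.toNat - 1 : Nat) : Int) + 1 = time + 1 + l by omega, hlast]

-- convenience: exit times strictly increasing front to back
def SC (b : List (Int × Int)) : Prop := List.Pairwise (fun a b : Int × Int => a.1 < b.1) b

theorem sc_append_singleton (b : List (Int × Int)) (q : Int × Int) (hsc : SC b)
    (h : ∀ r ∈ b, r.1 < q.1) : SC (b ++ [q]) := by
  unfold SC at *
  rw [List.pairwise_append]
  exact ⟨hsc, List.pairwise_singleton _ _, fun x hx y hy => by
    simp only [List.mem_singleton] at hy; subst hy; exact h x hx⟩

-- expire does nothing when every exit is in the future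
theorem expire_noop (t : Int) (b : List (Int × Int)) (cur : Int)
    (h : ∀ q ∈ b, t < q.1) : expireLoop t b cur = (b, cur) := by
  cases b with
  | nil => rfl
  | cons q r =>
    obtain ⟨e, x⟩ := q
    have : ¬ e ≤ t := by have := h (e, x) (by simp); omega
    simp [expireLoop, this]

-- jump does nothing when the package already fits
theorem jump_noop (wcap wt : Int) (b : List (Int × Int)) (t cur : Int)
    (h : ¬ cur + wt > wcap) : jumpLoop wcap wt b t cur = (b, t, cur) := by
  cases b with
  | nil => rfl
  | cons q r => obtain ⟨e, x⟩ := q; simp [jumpLoop, h]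

-- draining the belt once there are no packages left
theorem sim_drain (wcap : Int) (walk : List Int) (cur time : Int) (fuel : Nat) :
    simLoop wcap (walk.length + fuel) [] walk cur time = time + walk.length := by
  induction walk generalizing cur time with
  | nil => cases fuel <;> simp [simLoop]
  | cons a rest ih =>
    have h : rest.length + 1 + fuel = (rest.length + fuel) + 1 := by omega
    simp only [List.length_cons, h, simLoop, ih]
    push_cast; ring

-- d idle seconds in a row: the belt is untouched, time moves forward
theorem sim_idle (wcap l p : Int) (ps : List Int) (belt : List (Int × Int)) (d : Nat) :
    ∀ (time cur : Int) (fuel : Nat), 1 ≤ l →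
    (∀ q ∈ belt, time + d < q.1) → (∀ q ∈ belt, q.1 ≤ time + l) →
    ¬ (cur + p ≤ wcap) →
    simLoop wcap (d + fuel) (p :: ps) (render l time belt) cur time =
      simLoop wcap fuel (p :: ps) (render l (time + d) belt) cur (time + d) := by
  induction d with
  | zero => intro time cur fuel _ _ _ _; norm_num
  | succ d ih =>
    intro time cur fuel hl h1 h2 hfail
    have hne : ∀ q ∈ belt, q.1 ≠ time + 1 := by
      intro q hq; have := h1 q hq; push_cast at this ⊢; omega
    have hhead : lookE belt (time + 1) = 0 := lookE_eq_zero _ _ hne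
    have hstep : render l time belt = 0 :: tailr l time belt := by
      rw [render_cons _ _ _ hl, hhead]
    have htail : tailr l time belt ++ [0] = render l (time + 1) belt := by
      apply render_of_tail _ _ _ _ _ hl (fun s _ _ => rfl)
      apply lookE_eq_zero
      intro q hq; have := h2 q hq; omega
    have hfuel : d + 1 + fuel = (d + fuel) + 1 := by omega
    rw [hfuel, hstep]
    simp only [simLoop]
    rw [if_neg (by omega), htail]
    have := ih (time + 1) cur fuel hl
      (by intro q hq; have := h1 q hq; push_cast at this ⊢; omega)
      (by intro q hq; have := h2 q hq; omega) hfail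
    rw [show cur - 0 = cur by ring, this, show time + 1 + (d : Int) = time + ((d : Nat) + 1 : Nat) by push_cast; ring]

-- the jump loop against the simulation: from a saturated state (cur + p > wcap) the
-- simulation idles to each successive exit exactly as jumpLoop pops it
theorem sim_jump (wcap l p : Int) (ps : List Int) (B : Int) (belt : List (Int × Int)) :
    ∀ (time cur : Int), 1 ≤ l → p ≤ wcap →
    SC belt → (∀ q ∈ belt, time < q.1 ∧ q.1 ≤ B) → B ≤ time + l →
    cur = (belt.map Prod.snd).sum → ¬ (cur + p ≤ wcap) →
    ∃ b₂ t₂ c₂, jumpLoop wcap p belt time cur = (b₂, t₂, c₂) ∧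
      time < t₂ ∧ t₂ ≤ B ∧ SC b₂ ∧ (∀ q ∈ b₂, t₂ < q.1 ∧ q.1 ≤ B) ∧
      c₂ = (b₂.map Prod.snd).sum ∧
      ∀ fuel, simLoop wcap ((t₂ - time).toNat + fuel) (p :: ps) (render l time belt) cur time =
        simLoop wcap fuel ps (render l t₂ (b₂ ++ [(t₂ + l, p)])) (c₂ + p) t₂ := by
  induction belt with
  | nil =>
    intro time cur hl hp _ _ _ hcur hfail
    exfalso
    simp only [List.map_nil, List.sum_nil] at hcur
    omega
  | cons q rest ih =>
    obtain ⟨e, x⟩ := q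
    intro time cur hl hp hsc hb hB hcur hfail
    have hte : time < e := (hb (e, x) (by simp)).1
    have heB : e ≤ B := (hb (e, x) (by simp)).2
    have hrest_gt : ∀ q ∈ rest, e < q.1 := by
      intro q hq; exact (List.pairwise_cons.mp hsc).1 q hq
    have hrestB : ∀ q ∈ rest, e < q.1 ∧ q.1 ≤ B := by
      intro q hq; exact ⟨hrest_gt q hq, (hb q (by simp [hq])).2⟩
    have hsc' : SC rest := (List.pairwise_cons.mp hsc).2
    have hcur' : cur - x = (rest.map Prod.snd).sum := by
      simp only [List.map_cons, List.sum_cons] at hcur; omega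
    have hjl1 : jumpLoop wcap p ((e, x) :: rest) time cur = jumpLoop wcap p rest e (cur - x) := by
      simp only [jumpLoop]; rw [if_pos (by omega)]
    -- the d idle seconds before reaching exit e, then the arrival step at e
    have d := (e - time - 1).toNat
    have hstep : ∀ fuel : Nat,
        simLoop wcap ((e - time - 1).toNat + (fuel + 1)) (p :: ps)
            (render l time ((e, x) :: rest)) cur time =
          if cur - x + p ≤ wcap then
            simLoop wcap fuel ps (tailr l (e - 1) ((e, x) :: rest) ++ [p]) (cur - x + p) (e - 1 + 1)
          else
            simLoop wcap fuel (p :: ps) (tailr l (e - 1) ((e, x) :: rest) ++ [0]) (cur - x) (e - 1 + 1) := by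
      intro fuel
      rw [sim_idle wcap l p ps ((e, x) :: rest) (e - time - 1).toNat time cur (fuel + 1) hl
        (by intro q hq; rcases List.mem_cons.mp hq with h | h
            · subst h; simp; omega
            · have := hrest_gt q h; simp; omega)
        (by intro q hq; have := (hb q hq).2; omega) hfail]
      rw [show time + ((e - time - 1).toNat : Int) = e - 1 by omega]
      rw [render_cons l (e - 1) ((e, x) :: rest) hl]
      have hx : lookE ((e, x) :: rest) (e - 1 + 1) = x := by
        simp only [lookE]; rw [if_pos (by ring)]
      rw [hx]
      simp only [simLoop]
    by_cases hfit : cur - x + p ≤ wcap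
    · -- the package fits after this pop: jumpLoop stops here
      refine ⟨rest, e, cur - x, ?_, hte, heB, hsc', hrestB, hcur', ?_⟩
      · rw [hjl1, jump_noop wcap p rest e (cur - x) (by omega)]
      · intro fuel
        have hsp : (e - time).toNat + fuel = (e - time - 1).toNat + (fuel + 1) := by omega
        rw [hsp, hstep fuel, if_pos hfit]
        have hr : tailr l (e - 1) ((e, x) :: rest) ++ [p] =
            render l (e - 1 + 1) (rest ++ [(e + l, p)]) := by
          apply render_of_tail l (e - 1) _ _ p hl
          · intro s hs1 hs2
            have h1 : lookE ((e, x) :: rest) s = lookE rest s := by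
              simp only [lookE]; rw [if_neg (by omega)]
            have h2 : lookE (rest ++ [(e + l, p)]) s = lookE rest s := by
              apply lookE_append_left
              intro q hq
              simp only [List.mem_singleton] at hq
              subst hq; simp; omega
            rw [h1, h2]
          · rw [lookE_append_right]
            · simp only [lookE]
              rw [if_pos (by ring)]
            · intro q hq
              have := (hrestB q hq).2
              omega
        rw [hr, show e - 1 + 1 = e by ring]
    · -- still too heavy: jumpLoop pops on, the simulation idles on to the next exit
      obtain ⟨b₂, t₂, c₂, hjl2, ht1, ht2, hsc₂, hb₂, hc₂, hsim⟩ :=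
        ih e (cur - x) hl hp hsc' hrestB (by omega) hcur' (by omega)
      refine ⟨b₂, t₂, c₂, by rw [hjl1, hjl2], by omega, ht2, hsc₂, hb₂, hc₂, ?_⟩
      intro fuel
      have hsp : (t₂ - time).toNat + fuel = (e - time - 1).toNat + (((t₂ - e).toNat + fuel) + 1) := by
        omega
      rw [hsp, hstep ((t₂ - e).toNat + fuel), if_neg hfit]
      have hr : tailr l (e - 1) ((e, x) :: rest) ++ [0] = render l (e - 1 + 1) rest := by
        apply render_of_tail l (e - 1) _ _ 0 hl
        · intro s hs1 hs2
          simp only [lookE]; rw [if_neg (by omega)]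
        · apply lookE_eq_zero
          intro q hq
          have := (hrestB q hq).2
          omega
      rw [hr, show e - 1 + 1 = e by ring]
      exact hsim fuel

-- one package processed: procPkg against the simulation
theorem sim_pkg (wcap l p : Int) (ps : List Int) (belt : List (Int × Int)) (time cur : Int)
    (hl : 1 ≤ l) (hp : p ≤ wcap) (hsc : SC belt)
    (hb : ∀ q ∈ belt, time < q.1 ∧ q.1 ≤ time + l)
    (hcur : cur = (belt.map Prod.snd).sum) :
    ∃ belt₂ t₂ cur₂, procPkg l wcap (belt, time, cur) p = (belt₂, t₂, cur₂) ∧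
      time < t₂ ∧ t₂ ≤ time + l ∧ SC belt₂ ∧
      (∀ q ∈ belt₂, t₂ < q.1 ∧ q.1 ≤ t₂ + l) ∧
      cur₂ = (belt₂.map Prod.snd).sum ∧
      ∀ fuel, simLoop wcap ((t₂ - time).toNat + fuel) (p :: ps) (render l time belt) cur time =
        simLoop wcap fuel ps (render l t₂ belt₂) cur₂ t₂ := by
  -- the expire loop removes exactly the (at most one) item exiting at time+1,
  -- i.e. the weight at the head of A's dense belt
  have hexp : ∃ belt₁, expireLoop (time + 1) belt cur = (belt₁, cur - lookE belt (time + 1)) ∧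
      SC belt₁ ∧ (∀ q ∈ belt₁, time + 1 < q.1 ∧ q.1 ≤ time + l) ∧
      cur - lookE belt (time + 1) = (belt₁.map Prod.snd).sum ∧
      (∀ s : Int, time + 1 < s → lookE belt s = lookE belt₁ s) := by
    cases belt with
    | nil =>
      refine ⟨[], by simp [expireLoop, lookE], List.Pairwise.nil, by simp, ?_, fun _ _ => rfl⟩
      simp only [List.map_nil, List.sum_nil] at hcur ⊢
      simp [lookE, hcur]
    | cons q rest =>
      obtain ⟨e, x⟩ := q
      have hte : time < e := (hb (e, x) (by simp)).1
      have hrest_gt : ∀ q ∈ rest, e < q.1 := (List.pairwise_cons.mp hsc).1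
      have hsc' : SC rest := (List.pairwise_cons.mp hsc).2
      by_cases he1 : e = time + 1
      · refine ⟨rest, ?_, hsc', ?_, ?_, ?_⟩
        · simp only [expireLoop]
          rw [if_pos (by omega)]
          rw [expire_noop (time + 1) rest (cur - x) (by intro q hq; have := hrest_gt q hq; omega)]
          simp only [lookE]
          rw [if_pos he1]
        · intro q hq
          exact ⟨by have := hrest_gt q hq; omega, (hb q (by simp [hq])).2⟩
        · simp only [lookE]
          rw [if_pos he1]
          simp only [List.map_cons, List.sum_cons] at hcur
          omega
        · intro s hs
          simp only [lookE]
          rw [if_neg (by omega)]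
      · refine ⟨(e, x) :: rest, ?_, hsc, ?_, ?_, fun _ _ => rfl⟩
        · rw [expire_noop (time + 1) _ cur
            (by intro q hq; rcases List.mem_cons.mp hq with h | h
                · subst h; simp; omega
                · have := hrest_gt q h; simp; omega)]
          have h0 : lookE ((e, x) :: rest) (time + 1) = 0 := by
            apply lookE_eq_zero
            intro q hq
            rcases List.mem_cons.mp hq with h | h
            · subst h; simpa using he1
            · have := hrest_gt q h; simp; omega
          rw [h0]
          norm_num
        · intro q hq
          rcases List.mem_cons.mp hq with h | h
          · subst h; exact ⟨by simp; omega, (hb (e, x) (by simp)).2⟩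
          · exact ⟨by have := hrest_gt q h; simp; omega, (hb q (by simp [h])).2⟩
        · have h0 : lookE ((e, x) :: rest) (time + 1) = 0 := by
            apply lookE_eq_zero
            intro q hq
            rcases List.mem_cons.mp hq with h | h
            · subst h; simpa using he1
            · have := hrest_gt q h; simp; omega
          rw [h0, hcur]
          ring
  obtain ⟨belt₁, hexpEq, hsc₁, hb₁, hcur₁, hlook⟩ := hexp
  set a := lookE belt (time + 1) with ha
  by_cases hfit : cur - a + p ≤ wcap
  · -- the package fits at once: one simulated second
    have hjr : jumpLoop wcap p belt₁ (time + 1) (cur - a) = (belt₁, time + 1, cur - a) :=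
      jump_noop wcap p belt₁ (time + 1) (cur - a) (by omega)
    refine ⟨belt₁ ++ [(time + 1 + l, p)], time + 1, cur - a + p, ?_, by omega, by omega, ?_, ?_, ?_, ?_⟩
    · simp only [procPkg, hexpEq, hjr]
    · exact sc_append_singleton belt₁ _ hsc₁ (by intro r hr; have := (hb₁ r hr).2; omega)
    · intro q hq
      rcases List.mem_append.mp hq with h | h
      · exact ⟨(hb₁ q h).1, by have := (hb₁ q h).2; omega⟩
      · simp only [List.mem_singleton] at h
        subst h
        constructor <;> simp <;> omega
    · rw [List.map_append, List.sum_append]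
      simp only [List.map_cons, List.map_nil, List.sum_cons, List.sum_nil]
      omega
    · intro fuel
      rw [show (time + 1 - time).toNat + fuel = fuel + 1 by omega]
      rw [render_cons l time belt hl, ← ha]
      simp only [simLoop]
      rw [if_pos hfit]
      have hr : tailr l time belt ++ [p] = render l (time + 1) (belt₁ ++ [(time + 1 + l, p)]) := by
        apply render_of_tail l time _ _ p hl
        · intro s hs1 hs2
          rw [hlook s hs1]
          rw [lookE_append_left]
          intro q hq
          simp only [List.mem_singleton] at hq
          subst hq; simp; omega
        · rw [lookE_append_right]
          · simp [lookE]
          · intro q hq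
            have := (hb₁ q hq).2
            omega
      rw [hr]
  · -- still too heavy: hand over to the jump loop
    obtain ⟨b₂, t₂, c₂, hjl, ht1, ht2, hsc₂, hb₂, hc₂, hsim⟩ :=
      sim_jump wcap l p ps (time + l) belt₁ (time + 1) (cur - a) hl hp hsc₁ hb₁ (by omega)
        hcur₁ (by omega)
    refine ⟨b₂ ++ [(t₂ + l, p)], t₂, c₂ + p, ?_, by omega, ht2, ?_, ?_, ?_, ?_⟩
    · simp only [procPkg, hexpEq, hjl]
    · exact sc_append_singleton b₂ _ hsc₂ (by intro r hr; have := (hb₂ r hr).2; omega)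
    · intro q hq
      rcases List.mem_append.mp hq with h | h
      · exact ⟨(hb₂ q h).1, by have := (hb₂ q h).2; omega⟩
      · simp only [List.mem_singleton] at h
        subst h
        constructor <;> simp <;> omega
    · rw [List.map_append, List.sum_append]
      simp only [List.map_cons, List.map_nil, List.sum_cons, List.sum_nil]
      omega
    · intro fuel
      rw [show (t₂ - time).toNat + fuel = ((t₂ - (time + 1)).toNat + fuel) + 1 by omega]
      rw [render_cons l time belt hl, ← ha]
      simp only [simLoop]
      rw [if_neg hfit]
      have hr : tailr l time belt ++ [0] = render l (time + 1) belt₁ := by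
        apply render_of_tail l time _ _ 0 hl
        · intro s hs1 hs2
          exact hlook s hs1
        · apply lookE_eq_zero
          intro q hq
          have := (hb₁ q hq).2
          omega
      rw [hr]
      exact hsim fuel

-- the whole run: A's simulation equals B's fold followed by the final drain
theorem sim_fold (wcap l : Int) (pkgs : List Int) :
    ∀ (belt : List (Int × Int)) (time cur : Int) (fuel : Nat), 1 ≤ l →
    (∀ q ∈ pkgs, q ≤ wcap) → SC belt →
    (∀ q ∈ belt, time < q.1 ∧ q.1 ≤ time + l) →
    cur = (belt.map Prod.snd).sum →
    simLoop wcap (pkgs.length * (l.toNat + 1) + l.toNat + fuel) pkgs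
        (render l time belt) cur time =
      (pkgs.foldl (procPkg l wcap) (belt, time, cur)).2.1 + l := by
  induction pkgs with
  | nil =>
    intro belt time cur fuel hl _ _ _ _
    simp only [List.length_nil, Nat.zero_mul, Nat.zero_add, List.foldl_nil]
    rw [show l.toNat + fuel = (render l time belt).length + fuel by rw [render_length]]
    rw [sim_drain wcap (render l time belt) cur time fuel, render_length]
    omega
  | cons p ps ih =>
    intro belt time cur fuel hl hw hsc hb hcur
    obtain ⟨belt₂, t₂, cur₂, hpp, ht1, ht2, hsc₂, hb₂, hc₂, hsim⟩ :=
      sim_pkg wcap l p ps belt time cur hl (hw p (by simp)) hsc hb hcur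
    have hk : (t₂ - time).toNat ≤ l.toNat := by omega
    have harith : (p :: ps).length * (l.toNat + 1) + l.toNat + fuel =
        (t₂ - time).toNat +
          (ps.length * (l.toNat + 1) + l.toNat + ((l.toNat + 1 - (t₂ - time).toNat) + fuel)) := by
      have hmul : (p :: ps).length * (l.toNat + 1) = ps.length * (l.toNat + 1) + (l.toNat + 1) := by
        simp only [List.length_cons]
        ring
      rw [hmul]
      omega
    rw [harith, hsim (ps.length * (l.toNat + 1) + l.toNat + ((l.toNat + 1 - (t₂ - time).toNat) + fuel))]
    rw [ih belt₂ t₂ cur₂ _ hl (fun q hq => hw q (by simp [hq])) hsc₂ hb₂ hc₂]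
    simp only [List.foldl_cons, hpp]

-- ===== VERDICT (by name: the statement is the Claim_ definition above) =====
theorem simLoop_nil_walk (wcap : Int) (fuel : Nat) (pkgs : List Int) (cur time : Int) :
    simLoop wcap fuel pkgs [] cur time = time := by
  cases fuel <;> rfl

theorem solve_internal_spec : Claim_equal_solve_internal := by
  intro l w n weights _ hpre
  by_cases hl : 1 ≤ l
  swap
  · unfold Spec_solve_internal solve_internal solve_internal_alt
    rw [if_pos (by omega), show l.toNat = 0 from by omega]
    simp only [List.replicate, simLoop_nil_walk]
    rfl
  have hw := hpre hl
  unfold Spec_solve_internal solve_internal solve_internal_alt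
  rw [if_neg (by omega)]
  have hmain : simLoop w ((weights.length + 1) * (l.toNat + 1) + 1) weights
      (List.replicate l.toNat 0) 0 0 =
      (weights.foldl (procPkg l w) ([], 0, 0)).2.1 + l := by
    rw [show List.replicate l.toNat 0 = render l 0 [] from (render_nil_eq l 0).symm]
    rw [show (weights.length + 1) * (l.toNat + 1) + 1 =
      weights.length * (l.toNat + 1) + l.toNat + 2 from by ring]
    exact sim_fold w l weights [] 0 0 2 hl hw List.Pairwise.nil (by simp) rfl
  rw [hmain]
  by_cases hE : weights.isEmpty
  · rw [List.isEmpty_iff.mp hE]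
    simp
  · simp only [hE]
    simp
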